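-- pv_equiv track=rewrite | github.com/jk-jung/problem-solving | codewars/6kyu/6_The Sum Of The Prime Factors Of a Number... What For?.py | mult_primefactor_sum
-- ===== SOURCE A (Python) =====
-- def mult_primefactor_sum(a, b):
--     def f(x):
--         y = x
--         t = 0
--         i = 2
--         while i * i <= x:
--             while x % i == 0:
--                 x //= i
--                 t += i
--             i += 1
--         if t == 0: return 0
--         if x != 1: t += x
--         return y % t == 0
--
--     return [x for x in range(a, b + 1) if f(x)]
-- ===== SOURCE B (Python) =====
-- def mult_primefactor_sum(a, b):
--     if b < 4 or b < a:
--         return []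
--     # r = isqrt(b)
--     r = 1
--     while (r + 1) * (r + 1) <= b:
--         r += 1
--     # boolean sieve of Eratosthenes up to r: trial divisors can be restricted to primes
--     sieve = [True] * (r + 1)
--     primes = []
--     for i in range(2, r + 1):
--         if sieve[i]:
--             primes.append(i)
--             for j in range(i * i, r + 1, i):
--                 sieve[j] = False
--
--     def f(x):
--         y, t = x, 0
--         for p in primes:
--             if p * p > x:
--                 break
--             while x % p == 0:
--                 x //= p
--                 t += p
--         if t == 0:
--             return False
--         if x != 1:
--             t += x
--         return y % t == 0
--
--     return [x for x in range(max(a, 4), b + 1) if f(x)]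
-- ===== Notes on version B (the rewrite author's own statement) =====
-- stated objective: alternative
-- what changed: A trial-divides each x in [a,b] by every integer 2..sqrt(x); B first sieves the primes up to isqrt(b) once (Eratosthenes) and then factors each candidate by trial division over that prime list with an early break, keeping the same prime/1 exclusion and divisibility test.
import Mathlib
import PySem

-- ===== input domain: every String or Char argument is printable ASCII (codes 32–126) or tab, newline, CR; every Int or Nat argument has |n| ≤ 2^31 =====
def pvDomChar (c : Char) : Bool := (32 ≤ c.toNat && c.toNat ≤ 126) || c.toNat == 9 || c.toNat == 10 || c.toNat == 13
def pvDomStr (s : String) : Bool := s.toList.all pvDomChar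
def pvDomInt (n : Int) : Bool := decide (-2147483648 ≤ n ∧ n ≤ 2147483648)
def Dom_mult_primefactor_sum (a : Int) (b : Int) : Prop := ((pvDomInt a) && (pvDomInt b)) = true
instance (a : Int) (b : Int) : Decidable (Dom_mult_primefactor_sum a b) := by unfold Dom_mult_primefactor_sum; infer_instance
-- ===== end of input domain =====

-- B sieves the primes up to isqrt(b) once and trial-divides each number by primes only
-- (A tries every integer divisor per number). Return values proved equal on all inputs.

-- ===== PORT A =====
-- inner 'while x % i == 0' loop of f; the fuel argument is a totality guard only
-- (provably sufficient: each iteration strictly shrinks a positive x)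
def pvInnerA (i : Int) : Nat → Int → Int → Int × Int
  | 0, x, t => (x, t)
  | fuel+1, x, t =>
      if PySem.Int.mod x i = 0 then pvInnerA i fuel (PySem.Int.floordiv x i) (t + i)
      else (x, t)

-- outer 'while i * i <= x' loop of f; fuel is a totality guard (i strictly grows, x never grows)
def pvOuterA : Nat → Int → Int → Int → Int × Int
  | 0, x, t, _ => (x, t)
  | fuel+1, x, t, i =>
      if i * i ≤ x then
        let r := pvInnerA i (x.toNat + 1) x t
        pvOuterA fuel r.1 r.2 (i + 1)
      else (x, t)

-- A's inner function f; 'return 0' is falsy in the comprehension, so it is ported as false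
def pvF (x : Int) : Bool :=
  let r := pvOuterA (x.toNat + 1) x 0 2
  if r.2 = 0 then false
  else decide (PySem.Int.mod x (if r.1 ≠ 1 then r.2 + r.1 else r.2) = 0)

def mult_primefactor_sum (a : Int) (b : Int) : List Int :=
  (PySem.List.pyRange a (b + 1) 1).filter pvF

-- ===== PORT B =====
-- 'while (r + 1) * (r + 1) <= b: r += 1'; fuel is a totality guard (r strictly grows)
def pvIsqrtLoop : Nat → Int → Int → Int
  | 0, _, r => r
  | fuel+1, b, r => if (r + 1) * (r + 1) ≤ b then pvIsqrtLoop fuel b (r + 1) else r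

-- 'for j in range(i*i, r+1, i): sieve[j] = False'  (indices are in range, so pySetD is exact)
def pvMark (i : Int) (r : Int) (s : List Bool) : List Bool :=
  (PySem.List.pyRange (i * i) (r + 1) i).foldl (fun s j => PySem.List.pySetD s j false) s

-- the sieve loop: state is (sieve, primes)
def pvSievePrimes (r : Int) : List Bool × List Int :=
  (PySem.List.pyRange 2 (r + 1) 1).foldl
    (fun st i => if PySem.List.pyGetD st.1 i false then (pvMark i r st.1, st.2 ++ [i]) else st)
    (List.replicate (r.toNat + 1) true, [])

-- 'while x % p == 0: x //= p; t += p'; fuel is a totality guard (x strictly shrinks)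
def pvDivOut (p : Int) : Nat → Int → Int → Int × Int
  | 0, x, t => (x, t)
  | fuel+1, x, t =>
      if PySem.Int.mod x p = 0 then pvDivOut p fuel (PySem.Int.floordiv x p) (t + p)
      else (x, t)

-- 'for p in primes: if p * p > x: break; ...'
def pvForPrimes : List Int → Int → Int → Int × Int
  | [], x, t => (x, t)
  | p :: ps, x, t =>
      if p * p > x then (x, t)
      else
        let r := pvDivOut p (x.toNat + 1) x t
        pvForPrimes ps r.1 r.2

-- B's helper f; 'return False' / truthiness as in the comprehension
def pvFB (primes : List Int) (x : Int) : Bool :=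
  let r := pvForPrimes primes x 0
  if r.2 = 0 then false
  else decide (PySem.Int.mod x (if r.1 ≠ 1 then r.2 + r.1 else r.2) = 0)

def mult_primefactor_sum_alt (a : Int) (b : Int) : List Int :=
  if b < 4 ∨ b < a then []
  else
    let r := pvIsqrtLoop b.toNat b 1
    (PySem.List.pyRange (max a 4) (b + 1) 1).filter (pvFB (pvSievePrimes r).2)

-- ===== PRECONDITION & SPEC =====
def Spec_mult_primefactor_sum (a : Int) (b : Int) (out : List Int) : Prop := out = mult_primefactor_sum_alt a b
instance (a : Int) (b : Int) (out : List Int) : Decidable (Spec_mult_primefactor_sum a b out) := by unfold Spec_mult_primefactor_sum; infer_instance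

-- ===== CLAIM (what is proved, stated in full; the proofs are below) =====
def Claim_equal_mult_primefactor_sum : Prop := ∀ (a : Int) (b : Int), Dom_mult_primefactor_sum a b → Spec_mult_primefactor_sum a b (mult_primefactor_sum a b)

-- ===== LEMMAS AND PROOFS =====

-- sum of prime factors with multiplicity (the value both programs compute per number)
def sopfr (n : ℕ) : ℕ := n.primeFactorsList.sum

theorem sopfr_one : sopfr 1 = 0 := by simp [sopfr]

theorem sopfr_prime {p : ℕ} (hp : p.Prime) : sopfr p = p := by
  simp [sopfr, Nat.primeFactorsList_prime hp]

theorem sopfr_mul {m n : ℕ} (hm : m ≠ 0) (hn : n ≠ 0) : sopfr (m * n) = sopfr m + sopfr n := by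
  unfold sopfr
  rw [(Nat.perm_primeFactorsList_mul hm hn).sum_eq, List.sum_append]

theorem sopfr_rec {n : ℕ} (h : 2 ≤ n) : sopfr n = n.minFac + sopfr (n / n.minFac) := by
  obtain ⟨k, rfl⟩ : ∃ k, n = k + 2 := ⟨n - 2, by omega⟩
  rw [sopfr, Nat.primeFactorsList_add_two]
  simp [sopfr]

theorem sopfr_two_le {n : ℕ} (h : 2 ≤ n) : 2 ≤ sopfr n := by
  have hp := Nat.minFac_prime (by omega : n ≠ 1)
  have := hp.two_le
  rw [sopfr_rec h]
  omega

theorem sopfr_pow {p : ℕ} (hp : p.Prime) (k : ℕ) : sopfr (p ^ k) = p * k := by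
  induction k with
  | zero => simp [sopfr_one]
  | succ k ih =>
      rw [pow_succ, sopfr_mul (pow_ne_zero _ hp.pos.ne') hp.pos.ne', ih, sopfr_prime hp]
      ring

-- ---- A side ----

theorem innerA_spec : ∀ (fuel n m : ℕ) (t : Int), 2 ≤ m → 1 ≤ n → n ≤ fuel →
    ∃ (k n1 : ℕ), pvInnerA (m : Int) fuel (n : Int) t = ((n1 : Int), t + (m : Int) * (k : Int)) ∧
      n = n1 * m ^ k ∧ ¬ (m ∣ n1) ∧ 1 ≤ n1 := by
  intro fuel
  induction fuel with
  | zero => intro n m t hm hn hf; omega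
  | succ fuel ih =>
      intro n m t hm hn hf
      by_cases hdvd : n % m = 0
      · have hmd : m ∣ n := Nat.dvd_of_mod_eq_zero hdvd
        have h1 : 1 ≤ n / m := (Nat.one_le_div_iff (by omega)).mpr (Nat.le_of_dvd (by omega) hmd)
        have h2 : n / m ≤ fuel := by
          have : n / m < n := Nat.div_lt_self (by omega) (by omega)
          omega
        obtain ⟨k, n1, heq, hfact, hnd, hn1⟩ := ih (n / m) m (t + m) hm h1 h2
        refine ⟨k + 1, n1, ?_, ?_, hnd, hn1⟩
        · rw [pvInnerA]
          rw [if_pos (by simp [PySem.Int.mod_natCast, hdvd])]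
          rw [PySem.Int.floordiv_natCast, heq]
          refine Prod.ext rfl ?_
          push_cast
          ring
        · rw [pow_succ]
          calc n = m * (n / m) := (Nat.mul_div_cancel' hmd).symm
            _ = m * (n1 * m ^ k) := by rw [← hfact]
            _ = n1 * (m ^ k * m) := by ring
      · have hnd : ¬ (m ∣ n) := fun hd => hdvd (Nat.dvd_iff_mod_eq_zero.mp hd)
        refine ⟨0, n, ?_, by simp, hnd, hn⟩
        rw [pvInnerA]
        rw [if_neg (by simpa [PySem.Int.mod_eq_zero_iff_dvd, Int.natCast_dvd_natCast] using hnd)]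
        simp

-- a number all of whose prime factors exceed its square root is 1 or prime
theorem terminal_prime {n m : ℕ} (hn : 1 ≤ n)
    (inv : ∀ p : ℕ, p.Prime → p ∣ n → m ≤ p) (hlt : n < m * m) : n = 1 ∨ n.Prime := by
  rcases Nat.lt_or_ge n 2 with h2 | h2
  · left; omega
  · right
    by_contra hnp
    have hmf := Nat.minFac_prime (show n ≠ 1 by omega)
    have h1 : n.minFac ^ 2 ≤ n := Nat.minFac_sq_le_self (by omega) hnp
    have h2 : m ≤ n.minFac := inv _ hmf (Nat.minFac_dvd n)
    rw [pow_two] at h1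
    nlinarith

theorem outerA_spec : ∀ (fuel : ℕ) (n m : ℕ) (t : Int), 2 ≤ m → 1 ≤ n →
    (∀ p : ℕ, p.Prime → p ∣ n → m ≤ p) → n + 1 ≤ fuel + m →
    ∃ (n1 : ℕ), pvOuterA fuel (n : Int) t (m : Int) = ((n1 : Int), t + (sopfr n : Int) - (sopfr n1 : Int)) ∧
      1 ≤ n1 ∧ n1 ∣ n ∧ (n1 = 1 ∨ n1.Prime) ∧ (n.Prime → n1 = n) := by
  intro fuel
  induction fuel with
  | zero =>
      intro n m t hm hn inv hf
      refine ⟨n, ?_, hn, dvd_refl n, terminal_prime hn inv (by nlinarith), fun _ => rfl⟩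
      rw [pvOuterA]
      exact Prod.ext rfl (by ring)
  | succ fuel ih =>
      intro n m t hm hn inv hf
      by_cases hcond : ((m : Int) * m ≤ (n : Int))
      · have hcn : m * m ≤ n := by exact_mod_cast hcond
        obtain ⟨k, n1, heq, hfact, hnd, hn1⟩ :=
          innerA_spec (n + 1) n m t hm hn (Nat.le_succ n)
        have hn1dvd : n1 ∣ n := ⟨m ^ k, hfact⟩
        have hn1le : n1 ≤ n := Nat.le_of_dvd (by omega) hn1dvd
        have inv' : ∀ p : ℕ, p.Prime → p ∣ n1 → m + 1 ≤ p := by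
          intro p hp hpd
          have hpn : p ∣ n := hpd.trans hn1dvd
          have h1 := inv p hp hpn
          rcases Nat.lt_or_ge m p with h | h
          · omega
          · exfalso
            have : p = m := le_antisymm h h1
            exact hnd (this ▸ hpd)
        obtain ⟨n2, heq2, hn2, hn2dvd, hn2p, hn2prime⟩ :=
          ih n1 (m + 1) (t + (m : Int) * k) (by omega) hn1 inv' (by omega)
        have hsum : sopfr n = sopfr n1 + m * k := by
          rcases Nat.eq_zero_or_pos k with hk | hk
          · subst hk; rw [hfact]; simp
          · have hmdvd : m ∣ n := hfact ▸ (dvd_pow_self m (by omega) |>.mul_left n1)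
            have hmp : m.Prime := by
              have hmf := Nat.minFac_prime (show m ≠ 1 by omega)
              have h1 : m ≤ m.minFac := inv _ hmf ((Nat.minFac_dvd m).trans hmdvd)
              have h2 : m.minFac ≤ m := Nat.minFac_le (by omega)
              exact (Nat.prime_def_minFac.mpr ⟨hm, le_antisymm h2 h1⟩)
            rw [hfact, sopfr_mul (by omega) (pow_ne_zero _ (by omega)), sopfr_pow hmp]
        refine ⟨n2, ?_, hn2, hn2dvd.trans hn1dvd, hn2p, ?_⟩
        · rw [pvOuterA, if_pos hcond]
          have htn : ((n : Int).toNat + 1) = n + 1 := by simp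
          rw [htn, heq]
          have : ((m : ℕ) : Int) + 1 = ((m + 1 : ℕ) : Int) := by push_cast; ring
          rw [this, heq2]
          refine Prod.ext rfl ?_
          rw [hsum]; push_cast; ring
        · intro hp
          have hk0 : k = 0 := by
            by_contra hk
            have hmdvd : m ∣ n := hfact ▸ (dvd_pow_self m hk |>.mul_left n1)
            rcases (Nat.Prime.eq_one_or_self_of_dvd hp m hmdvd) with h | h
            · omega
            · subst h; nlinarith
          have hn1n : n1 = n := by rw [hfact, hk0, pow_zero, mul_one]
          rw [hn2prime (hn1n ▸ hp), hn1n]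
      · have hcn : n < m * m := by
          rcases Nat.lt_or_ge n (m * m) with h | h
          · exact h
          · exact absurd (by exact_mod_cast h : ((m : Int) * m ≤ (n : Int))) hcond
        refine ⟨n, ?_, hn, dvd_refl n, terminal_prime hn inv hcn, fun _ => rfl⟩
        rw [pvOuterA, if_neg hcond]
        exact Prod.ext rfl (by ring)

-- the common tail of A's f and B's f after the division loop
theorem tail_analysis {n n1 : ℕ} (hn4 : 4 ≤ n) (hn1 : 1 ≤ n1) (hdvd : n1 ∣ n)
    (hp1 : n1 = 1 ∨ n1.Prime) (hpn : n.Prime → n1 = n) :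
    (if ((0 : Int) + (sopfr n : Int) - (sopfr n1 : Int)) = 0 then false
     else decide (PySem.Int.mod (n : Int)
        (if ((n1 : ℕ) : Int) ≠ 1 then ((0 : Int) + (sopfr n : Int) - (sopfr n1 : Int)) + (n1 : Int)
         else ((0 : Int) + (sopfr n : Int) - (sopfr n1 : Int))) = 0))
    = decide (¬ n.Prime ∧ PySem.Int.mod (n : Int) ((sopfr n : ℕ) : Int) = 0) := by
  by_cases hprime : n.Prime
  · have h1 : n1 = n := hpn hprime
    subst h1
    simp [hprime]
  · have hn1n : n1 ≠ n := by
      rcases hp1 with h | h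
      · omega
      · intro hc; exact hprime (hc ▸ h)
    obtain ⟨c, hc⟩ := hdvd
    have hc2 : 2 ≤ c := by
      rcases Nat.lt_or_ge c 2 with h | h
      · interval_cases c
        · omega
        · simp at hc; omega
      · exact h
    have hsum : sopfr n = sopfr n1 + sopfr c := by rw [hc, sopfr_mul (by omega) (by omega)]
    have hclow : 2 ≤ sopfr c := sopfr_two_le hc2
    have hne0 : (0 : Int) + (sopfr n : Int) - (sopfr n1 : Int) ≠ 0 := by omega
    rw [if_neg hne0]
    have ht : (if ((n1 : ℕ) : Int) ≠ 1 then ((0 : Int) + (sopfr n : Int) - (sopfr n1 : Int)) + (n1 : Int)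
        else ((0 : Int) + (sopfr n : Int) - (sopfr n1 : Int))) = ((sopfr n : ℕ) : Int) := by
      rcases hp1 with h | h
      · subst h; rw [if_neg (by norm_num)]; rw [sopfr_one]; ring
      · rw [if_pos (by exact_mod_cast h.one_lt.ne')]
        rw [sopfr_prime h]; ring
    rw [ht]
    simp [hprime]

theorem pvF_spec (x : Int) :
    pvF x = decide (4 ≤ x ∧ ¬ x.toNat.Prime ∧ PySem.Int.mod x ((sopfr x.toNat : ℕ) : Int) = 0) := by
  by_cases hx4 : 4 ≤ x
  · have hx0 : 0 ≤ x := by omega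
    have hxn : x = ((x.toNat : ℕ) : Int) := (Int.toNat_of_nonneg hx0).symm
    set n := x.toNat with hn
    have hn4 : 4 ≤ n := by omega
    obtain ⟨n1, heq, hn1, hdvd, hp1, hpn⟩ :=
      outerA_spec (n + 1) n 2 0 (le_refl 2) (by omega) (fun p hp _ => hp.two_le) (by omega)
    rw [show (((2 : ℕ)) : Int) = (2 : Int) by norm_num] at heq
    rw [hxn]
    simp only [pvF, Int.toNat_natCast, heq]
    rw [tail_analysis hn4 hn1 hdvd hp1 hpn]
    have h4' : (4 : Int) ≤ ((n : ℕ) : Int) := by exact_mod_cast hn4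
    simp [h4']
  · have h1 : pvF x = false := by
      unfold pvF
      rw [pvOuterA]
      rw [if_neg (by omega : ¬ ((2 : Int) * 2 ≤ x))]
      simp
    rw [h1]
    simp [hx4]

-- ---- B side ----

theorem isqrt_spec : ∀ (fuel bn rn : ℕ), 1 ≤ rn → rn * rn ≤ bn → bn ≤ fuel + rn →
    ∃ s : ℕ, pvIsqrtLoop fuel (bn : Int) (rn : Int) = (s : Int) ∧
      1 ≤ s ∧ s * s ≤ bn ∧ bn < (s + 1) * (s + 1) := by
  intro fuel
  induction fuel with
  | zero =>
      intro bn rn h1 hsq hf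
      refine ⟨rn, by rw [pvIsqrtLoop], h1, hsq, by nlinarith⟩
  | succ fuel ih =>
      intro bn rn h1 hsq hf
      rw [pvIsqrtLoop]
      by_cases hcond : ((rn : Int) + 1) * ((rn : Int) + 1) ≤ (bn : Int)
      · rw [if_pos hcond]
        have hc : (rn + 1) * (rn + 1) ≤ bn := by exact_mod_cast hcond
        have := ih bn (rn + 1) (by omega) hc (by omega)
        rw [show ((rn : Int) + 1) = ((rn + 1 : ℕ) : Int) by push_cast; ring]
        exact this
      · rw [if_neg hcond]
        refine ⟨rn, rfl, h1, hsq, ?_⟩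
        rcases Nat.lt_or_ge bn ((rn + 1) * (rn + 1)) with h | h
        · exact h
        · exact absurd (by exact_mod_cast h : ((rn : Int) + 1) * ((rn : Int) + 1) ≤ (bn : Int)) hcond

theorem foldSetFalse_spec : ∀ (js : List Int) (s : List Bool),
    (∀ j ∈ js, 0 ≤ j ∧ j < (s.length : Int)) →
    (js.foldl (fun s j => PySem.List.pySetD s j false) s).length = s.length ∧
    ∀ m : ℕ, (js.foldl (fun s j => PySem.List.pySetD s j false) s).getD m false =
      if (m : Int) ∈ js then false else s.getD m false := by
  intro js
  induction js with
  | nil => intro s _; exact ⟨rfl, by simp⟩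
  | cons j rest ih =>
      intro s hb
      obtain ⟨hj0, hjlt⟩ := hb j List.mem_cons_self
      have hlen1 : (PySem.List.pySetD s j false).length = s.length := PySem.List.length_pySetD s j false
      obtain ⟨ihlen, ihget⟩ := ih (PySem.List.pySetD s j false) (by
        intro j' hj'
        rw [hlen1]
        exact hb j' (List.mem_cons_of_mem _ hj'))
      constructor
      · rw [List.foldl_cons, ihlen, hlen1]
      · intro m
        rw [List.foldl_cons, ihget m]
        by_cases hmem : (m : Int) ∈ rest
        · simp [hmem]
        · simp only [hmem, if_false, List.mem_cons]
          have hjn : j = ((j.toNat : ℕ) : Int) := (Int.toNat_of_nonneg hj0).symm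
          by_cases hmj : (m : Int) = j
          · have hset : (PySem.List.pySetD s j false).getD m false = false := by
              rw [← hmj, PySem.List.pySetD_natCast]
              have hmlt : m < s.length := by omega
              simp [List.getD_eq_getElem?_getD, hmlt]
            rw [hset]
            simp [hmj]
          · have hset : (PySem.List.pySetD s j false).getD m false = s.getD m false := by
              rw [hjn, PySem.List.pySetD_natCast]
              have : j.toNat ≠ m := by
                intro hc
                exact hmj (by rw [hjn, hc])
              simp [List.getD_eq_getElem?_getD, List.getElem?_set_ne this]
            rw [hset]
            simp [hmj]

-- sieve invariant: cell k is still true iff no prime below i kills k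
def NoSmall (i k : ℕ) : Prop := ¬ ∃ p : ℕ, p.Prime ∧ p < i ∧ p ∣ k ∧ p * p ≤ k

def sieveOk (r i : ℕ) (s : List Bool) : Prop :=
  s.length = r + 1 ∧ ∀ k : ℕ, k ≤ r → (s.getD k false = true ↔ NoSmall i k)

theorem sieveOk_guard {r i : ℕ} {s : List Bool} (h : sieveOk r i s) (h2 : 2 ≤ i) (hir : i ≤ r) :
    (s.getD i false = true) ↔ i.Prime := by
  rw [h.2 i hir]
  constructor
  · intro hns
    by_contra hnp
    have hmflt : i.minFac < i := (Nat.not_prime_iff_minFac_lt h2).mp hnp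
    have hmfsq : i.minFac * i.minFac ≤ i := by
      have := Nat.minFac_sq_le_self (show 0 < i by omega) hnp
      nlinarith [this]
    exact hns ⟨i.minFac, Nat.minFac_prime (by omega), hmflt, Nat.minFac_dvd i, hmfsq⟩
  · rintro hp ⟨p, hpp, hplt, hpdvd, _⟩
    rcases (hp.eq_one_or_self_of_dvd p hpdvd) with h | h
    · exact hpp.one_lt.ne' h
    · omega

theorem mark_ok {r i : ℕ} {s : List Bool} (hp : i.Prime) (hir : i ≤ r) (h : sieveOk r i s) :
    sieveOk r (i + 1) (pvMark (i : Int) (r : Int) s) := by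
  obtain ⟨hlen, hget⟩ := h
  have hi2 := hp.two_le
  have hipos : (0 : Int) < (i : Int) := by exact_mod_cast (show 0 < i by omega)
  have hbounds : ∀ j ∈ PySem.List.pyRange ((i : Int) * i) ((r : Int) + 1) i,
      0 ≤ j ∧ j < (s.length : Int) := by
    intro j hj
    rw [PySem.List.mem_pyRange_iff_of_pos hipos] at hj
    obtain ⟨h1, h2, _⟩ := hj
    have : (0 : Int) ≤ (i : Int) * i := by positivity
    refine ⟨by omega, ?_⟩
    rw [hlen]; push_cast; omega
  obtain ⟨flen, fget⟩ := foldSetFalse_spec _ s hbounds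
  rw [pvMark]
  refine ⟨by rw [flen, hlen], ?_⟩
  intro k hk
  rw [fget k]
  have hmem : ((k : Int) ∈ PySem.List.pyRange ((i : Int) * i) ((r : Int) + 1) i) ↔ (i * i ≤ k ∧ i ∣ k) := by
    rw [PySem.List.mem_pyRange_iff_of_pos hipos]
    constructor
    · rintro ⟨h1, _, h3⟩
      have hii : (i : Int) ∣ (i : Int) * i := Dvd.intro i rfl
      have : (i : Int) ∣ (k : Int) := by
        have := dvd_add h3 hii
        simpa using this
      exact ⟨by exact_mod_cast h1, by exact_mod_cast this⟩
    · rintro ⟨h1, h2⟩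
      have hii : (i : Int) ∣ (i : Int) * i := Dvd.intro i rfl
      refine ⟨by exact_mod_cast h1, by omega, ?_⟩
      have h2' : (i : Int) ∣ (k : Int) := by exact_mod_cast h2
      exact dvd_sub h2' hii
  by_cases hk2 : i * i ≤ k ∧ i ∣ k
  · rw [if_pos (hmem.mpr hk2)]
    refine iff_of_false (by simp) ?_
    intro hns
    exact hns ⟨i, hp, by omega, hk2.2, hk2.1⟩
  · rw [if_neg (fun hc => hk2 (hmem.mp hc))]
    rw [hget k hk]
    unfold NoSmall
    constructor
    · rintro hns ⟨p, hpp, hplt, hpdvd, hpsq⟩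
      rcases Nat.lt_or_ge p i with h | h
      · exact hns ⟨p, hpp, h, hpdvd, hpsq⟩
      · have : p = i := by omega
        subst this
        exact hk2 ⟨hpsq, hpdvd⟩
    · rintro hns ⟨p, hpp, hplt, hpdvd, hpsq⟩
      exact hns ⟨p, hpp, by omega, hpdvd, hpsq⟩

theorem not_prime_ok {r i : ℕ} {s : List Bool} (hnp : ¬ i.Prime) (h : sieveOk r i s) :
    sieveOk r (i + 1) s := by
  obtain ⟨hlen, hget⟩ := h
  refine ⟨hlen, fun k hk => ?_⟩
  rw [hget k hk]
  unfold NoSmall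
  constructor
  · rintro hns ⟨p, hpp, hplt, hpdvd, hpsq⟩
    refine hns ⟨p, hpp, ?_, hpdvd, hpsq⟩
    rcases Nat.lt_or_ge p i with h | h
    · exact h
    · exact absurd (show p = i by omega) (fun hc => hnp (hc ▸ hpp))
  · rintro hns ⟨p, hpp, hplt, hpdvd, hpsq⟩
    exact hns ⟨p, hpp, by omega, hpdvd, hpsq⟩

theorem sieveLoop_spec : ∀ (n r i : ℕ) (s : List Bool) (acc : List Int), 2 ≤ i → r + 1 ≤ i + n →
    sieveOk r i s →
    ((PySem.List.pyRange (i : Int) ((r : Int) + 1) 1).foldl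
        (fun st q => if PySem.List.pyGetD st.1 q false then (pvMark q (r : Int) st.1, st.2 ++ [q]) else st)
        (s, acc)).2
      = acc ++ (PySem.List.pyRange (i : Int) ((r : Int) + 1) 1).filter (fun q => decide (q.toNat.Prime)) := by
  intro n
  induction n with
  | zero =>
      intro r i s acc h2 hf _
      rw [PySem.List.pyRange_one_eq_nil (by exact_mod_cast (show r + 1 ≤ i by omega))]
      simp
  | succ n ih =>
      intro r i s acc h2 hf h
      rcases Nat.lt_or_ge r i with hri | hir
      · rw [PySem.List.pyRange_one_eq_nil (by exact_mod_cast (show r + 1 ≤ i by omega))]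
        simp
      · have hlt : ((i : Int)) < (r : Int) + 1 := by exact_mod_cast (show i < r + 1 by omega)
        rw [PySem.List.pyRange_one_cons hlt, List.foldl_cons, List.filter_cons]
        have hgd : PySem.List.pyGetD s (i : Int) false = s.getD i false :=
          PySem.List.pyGetD_natCast s i false
        have hcast : ((i : Int) + 1) = ((i + 1 : ℕ) : Int) := by push_cast; ring
        by_cases hpr : i.Prime
        · rw [if_pos (by rw [hgd]; exact (sieveOk_guard h h2 hir).mpr hpr)]
          rw [hcast, ih r (i + 1) _ (acc ++ [(i : Int)]) (by omega) (by omega) (mark_ok hpr hir h)]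
          simp [hpr]
        · rw [if_neg (by
            rw [hgd]
            intro hc
            exact hpr ((sieveOk_guard h h2 hir).mp hc))]
          rw [hcast, ih r (i + 1) s acc (by omega) (by omega) (not_prime_ok hpr h)]
          simp [hpr]

theorem sievePrimes_spec (r : ℕ) :
    (pvSievePrimes (r : Int)).2
      = (PySem.List.pyRange 2 ((r : Int) + 1) 1).filter (fun q => decide (q.toNat.Prime)) := by
  have hinit : sieveOk r 2 (List.replicate (((r : Int)).toNat + 1) true) := by
    refine ⟨by simp, fun k hk => ?_⟩
    have hklt : k < ((r : Int)).toNat + 1 := by simp; omega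
    rw [List.getD_eq_getElem _ _ (by simpa using hklt)]
    simp only [List.getElem_replicate]
    refine iff_of_true (by simp) ?_
    rintro ⟨p, hp, hlt, _, _⟩
    have := hp.two_le
    omega
  have h := sieveLoop_spec r r 2 (List.replicate (((r : Int)).toNat + 1) true) [] (le_refl 2)
    (by omega) hinit
  rw [show (((2 : ℕ)) : Int) = (2 : Int) by norm_num] at h
  rw [pvSievePrimes, h]
  simp

theorem divOut_eq_innerA : ∀ (p : Int) (fuel : ℕ) (x t : Int),
    pvDivOut p fuel x t = pvInnerA p fuel x t := by
  intro p fuel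
  induction fuel with
  | zero => intro x t; rfl
  | succ fuel ih =>
      intro x t
      rw [pvDivOut, pvInnerA]
      split
      · exact ih _ _
      · rfl

theorem no_small_factor_prime {n : ℕ} (hn : 1 ≤ n)
    (h : ∀ p : ℕ, p.Prime → p ∣ n → ¬ p * p ≤ n) : n = 1 ∨ n.Prime := by
  rcases Nat.lt_or_ge n 2 with h2 | h2
  · left; omega
  · right
    by_contra hnp
    have hmf := Nat.minFac_prime (show n ≠ 1 by omega)
    have h1 : n.minFac ^ 2 ≤ n := Nat.minFac_sq_le_self (by omega) hnp
    rw [pow_two] at h1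
    exact h n.minFac hmf (Nat.minFac_dvd n) h1

theorem forPrimes_spec : ∀ (ps : List Int) (n : ℕ) (t : Int), 1 ≤ n →
    (∀ q ∈ ps, ∃ qn : ℕ, q = (qn : Int) ∧ qn.Prime) →
    List.Pairwise (· < ·) ps →
    (∀ p : ℕ, p.Prime → p ∣ n → p * p ≤ n → (p : Int) ∈ ps) →
    ∃ n1 : ℕ, pvForPrimes ps (n : Int) t = ((n1 : Int), t + (sopfr n : Int) - (sopfr n1 : Int)) ∧
      1 ≤ n1 ∧ n1 ∣ n ∧ (n1 = 1 ∨ n1.Prime) ∧ (n.Prime → n1 = n) := by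
  intro ps
  induction ps with
  | nil =>
      intro n t hn _ _ hcomp
      refine ⟨n, ?_, hn, dvd_refl n, ?_, fun _ => rfl⟩
      · rw [pvForPrimes]
        exact Prod.ext rfl (by ring)
      · exact no_small_factor_prime hn (fun p hp hpd hpsq =>
          (List.not_mem_nil) (hcomp p hp hpd hpsq))
  | cons q ps ih =>
      intro n t hn hall hpair hcomp
      obtain ⟨qn, hqcast, hqprime⟩ := hall q List.mem_cons_self
      subst hqcast
      have hq2 := hqprime.two_le
      by_cases hbr : ((qn : Int) * qn > (n : Int))
      · rw [pvForPrimes, if_pos hbr]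
        have hbrn : ¬ (qn * qn ≤ n) := by
          intro hc
          exact absurd (by exact_mod_cast hc : ((qn : Int) * qn ≤ (n : Int))) (by omega)
        refine ⟨n, Prod.ext rfl (by ring), hn, dvd_refl n, ?_, fun _ => rfl⟩
        refine no_small_factor_prime hn (fun p hp hpd hpsq => ?_)
        have hmem := hcomp p hp hpd hpsq
        have hqle : qn ≤ p := by
          rcases List.mem_cons.mp hmem with h | h
          · have : p = qn := by exact_mod_cast h
            omega
          · have := (List.pairwise_cons.mp hpair).1 _ h
            exact_mod_cast le_of_lt this
        exact hbrn (by nlinarith)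
      · rw [pvForPrimes, if_neg hbr]
        obtain ⟨k, x1, heq, hfact, hnd, hx1⟩ :=
          innerA_spec (n + 1) n qn t hq2 hn (Nat.le_succ n)
        rw [divOut_eq_innerA]
        have htn : (((n : ℕ) : Int)).toNat + 1 = n + 1 := by simp
        rw [htn, heq]
        have hx1dvd : x1 ∣ n := ⟨qn ^ k, hfact⟩
        have hx1le : x1 ≤ n := Nat.le_of_dvd (by omega) hx1dvd
        obtain ⟨n2, heq2, hn2, hn2dvd, hn2p, hn2prime⟩ :=
          ih x1 (t + (qn : Int) * k) hx1
            (fun q' hq' => hall q' (List.mem_cons_of_mem _ hq'))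
            (List.pairwise_cons.mp hpair).2
            (by
              intro p hp hpd hpsq
              have hpn : p ∣ n := hpd.trans hx1dvd
              have hpsq' : p * p ≤ n := le_trans hpsq hx1le
              rcases List.mem_cons.mp (hcomp p hp hpn hpsq') with h | h
              · exfalso
                have : p = qn := by exact_mod_cast h
                exact hnd (this ▸ hpd)
              · exact h)
        have hsum : sopfr n = sopfr x1 + qn * k := by
          rw [hfact, sopfr_mul (by omega) (pow_ne_zero _ (by omega)), sopfr_pow hqprime]
        refine ⟨n2, ?_, hn2, hn2dvd.trans hx1dvd, hn2p, ?_⟩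
        · rw [heq2]
          refine Prod.ext rfl ?_
          rw [hsum]; push_cast; ring
        · intro hprime
          have hk0 : k = 0 := by
            by_contra hk
            have hqdvd : qn ∣ n := hfact ▸ (dvd_pow_self qn hk |>.mul_left x1)
            rcases hprime.eq_one_or_self_of_dvd qn hqdvd with h | h
            · omega
            · have hle : qn * qn ≤ n := by
                rcases Nat.lt_or_ge n (qn * qn) with hlt | hge
                · exact absurd (show ((qn : Int) * qn > (n : Int)) by exact_mod_cast hlt) hbr
                · exact hge
              rw [h] at hq2 hle
              nlinarith
          have hx1n : x1 = n := by rw [hfact, hk0, pow_zero, mul_one]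
          rw [hn2prime (hx1n ▸ hprime), hx1n]

theorem pvFB_spec {bn r : ℕ} (hrb : bn < (r + 1) * (r + 1)) (x : ℕ) (h4 : 4 ≤ x) (hxb : x ≤ bn) :
    pvFB ((PySem.List.pyRange 2 ((r : Int) + 1) 1).filter (fun q => decide (q.toNat.Prime))) (x : Int)
      = decide (¬ x.Prime ∧ PySem.Int.mod (x : Int) ((sopfr x : ℕ) : Int) = 0) := by
  obtain ⟨n1, heq, hn1, hdvd, hp1, hpn⟩ :=
    forPrimes_spec ((PySem.List.pyRange 2 ((r : Int) + 1) 1).filter (fun q => decide (q.toNat.Prime)))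
      x 0 (by omega)
      (by
        intro q hq
        obtain ⟨hqr, hqp⟩ := List.mem_filter.mp hq
        rw [PySem.List.mem_pyRange_one] at hqr
        refine ⟨q.toNat, (Int.toNat_of_nonneg (by omega)).symm, by simpa using hqp⟩)
      ((PySem.List.pairwise_lt_pyRange_one 2 ((r : Int) + 1)).filter _)
      (by
        intro p hp hpd hpsq
        have hpr : p ≤ r := by nlinarith [le_trans hpsq hxb]
        refine List.mem_filter.mpr ⟨?_, by simp [hp]⟩
        rw [PySem.List.mem_pyRange_one]
        exact ⟨by exact_mod_cast hp.two_le, by exact_mod_cast (show p < r + 1 by omega)⟩)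
  simp only [pvFB, heq]
  exact tail_analysis h4 hn1 hdvd hp1 hpn

-- ---- assembly ----

theorem main_eq (a b : Int) : mult_primefactor_sum a b = mult_primefactor_sum_alt a b := by
  unfold mult_primefactor_sum mult_primefactor_sum_alt
  by_cases hcase : b < 4 ∨ b < a
  · rw [if_pos hcase]
    rcases le_or_gt a b with hab | hab
    · apply List.filter_eq_nil_iff.mpr
      intro x hx
      rw [PySem.List.mem_pyRange_one] at hx
      rw [pvF_spec]
      simp only [decide_eq_true_eq, not_and]
      intro h4
      omega
    · rw [PySem.List.pyRange_one_eq_nil (by omega)]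
      rfl
  · rw [if_neg hcase]
    have hb4 : 4 ≤ b := by by_contra h; exact hcase (Or.inl (by omega))
    have hba : a ≤ b := by by_contra h; exact hcase (Or.inr (by omega))
    have hbn : b = ((b.toNat : ℕ) : Int) := (Int.toNat_of_nonneg (by omega)).symm
    have hb4n : 4 ≤ b.toNat := by omega
    obtain ⟨rn, hreq, hrn1, hrsq, hrlt⟩ :=
      isqrt_spec b.toNat b.toNat 1 (le_refl 1) (by omega) (by omega)
    have heqr : pvIsqrtLoop b.toNat b 1 = (rn : Int) := by
      simpa only [← hbn, Nat.cast_one] using hreq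
    show _ = (PySem.List.pyRange (max a 4) (b + 1) 1).filter
        (pvFB (pvSievePrimes (pvIsqrtLoop b.toNat b 1)).2)
    rw [heqr, sievePrimes_spec rn]
    rw [PySem.List.pyRange_one_append a (max a 4) (b + 1) (le_max_left a 4) (by omega),
      List.filter_append]
    have h1 : (PySem.List.pyRange a (max a 4) 1).filter pvF = [] := by
      apply List.filter_eq_nil_iff.mpr
      intro x hx
      rw [PySem.List.mem_pyRange_one] at hx
      rw [pvF_spec]
      simp only [decide_eq_true_eq, not_and]
      intro h4
      omega
    rw [h1, List.nil_append]
    apply List.filter_congr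
    intro x hx
    rw [PySem.List.mem_pyRange_one] at hx
    have hx4 : 4 ≤ x := le_trans (le_max_right a 4) hx.1
    have hxn : x = ((x.toNat : ℕ) : Int) := (Int.toNat_of_nonneg (by omega)).symm
    rw [pvF_spec, hxn]
    rw [pvFB_spec hrlt x.toNat (by omega) (by omega)]
    simp only [Int.toNat_natCast]
    simp
    exact fun _ _ => hx4

-- ===== VERDICT (by name: the statement is the Claim_ definition above) =====
theorem mult_primefactor_sum_spec : Claim_equal_mult_primefactor_sum := by
  intro a b _
  unfold Spec_mult_primefactor_sum
  exact main_eq a b
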